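-- pv_equiv track=rewrite | github.com/prototact/advent-of-code-solutions | 2020/day10/day10.py | diffs
-- ===== SOURCE A (Python) =====
-- def diffs(values: list[int]) -> int:
--     all_diffs:list[int] = []
--     for elem1, elem2 in zip(values[:-1], values[1:]):
--         diff = elem2 - elem1
--         all_diffs.append(diff)
--     all_diffs.append(3)
--     ones = all_diffs.count(1)
--     threes = all_diffs.count(3)
--     return ones * threes
-- ===== SOURCE B (Python) =====
-- def diffs(values: list[int]) -> int:
--     # Divide and conquer: recursively count 1-diffs and 3-diffs among the
--     # adjacent pairs of each half; the only pair the halves miss straddles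
--     # the split point. The final appended diff of 3 becomes (threes + 1).
--     def go(vs):
--         if len(vs) < 2:
--             return (0, 0)
--         mid = len(vs) // 2
--         left, right = vs[:mid], vs[mid:]
--         lo, lt = go(left)
--         ro, rt = go(right)
--         d = right[0] - left[-1]
--         return (lo + ro + (1 if d == 1 else 0), lt + rt + (1 if d == 3 else 0))
--
--     ones, threes = go(values)
--     return ones * (threes + 1)
-- ===== Notes on version B (the rewrite author's own statement) =====
-- stated objective: alternative
-- what changed: B replaces A's linear build-a-diff-list-then-two-count-scans by a divide-and-conquer recursion that splits the list in half, counts 1-diffs and 3-diffs in each half and adds the one straddling diff, returning ones * (threes + 1) for the appended final 3.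
import Mathlib
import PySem

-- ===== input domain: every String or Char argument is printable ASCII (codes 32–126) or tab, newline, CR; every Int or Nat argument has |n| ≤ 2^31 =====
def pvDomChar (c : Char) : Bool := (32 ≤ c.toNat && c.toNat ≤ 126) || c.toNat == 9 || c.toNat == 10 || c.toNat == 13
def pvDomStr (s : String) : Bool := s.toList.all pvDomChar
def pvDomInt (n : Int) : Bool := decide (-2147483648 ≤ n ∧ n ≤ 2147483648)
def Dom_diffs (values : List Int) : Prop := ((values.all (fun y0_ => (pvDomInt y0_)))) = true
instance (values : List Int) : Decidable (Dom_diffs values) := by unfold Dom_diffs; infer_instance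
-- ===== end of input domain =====

-- B replaces A's build-a-diff-list-then-two-count-scans by a halving divide-and-conquer recursion; alternative decomposition, same results.

-- ===== PORT A =====
def diffs (values : List Int) : Int :=
  let all_diffs : List Int :=
    ((PySem.List.slice values none (some (-1))).zip (PySem.List.slice values (some 1) none)).foldl
      (fun acc p => acc ++ [p.2 - p.1]) []
  let all_diffs := all_diffs ++ [3]
  let ones : Int := (PySem.List.count all_diffs 1 : Nat)
  let threes : Int := (PySem.List.count all_diffs 3 : Nat)
  ones * threes

-- ===== PORT B =====
-- go(vs): (ones, threes) among adjacent diffs of vs, by divide and conquer.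
-- Python's right[0] / left[-1] ported as head? / getLast? (exact: none = IndexError,
-- unreachable here since both halves are nonempty when len(vs) >= 2).
def diffsGo (vs : List Int) : Int × Int :=
  if _h : vs.length < 2 then (0, 0)
  else
    let mid := vs.length / 2
    let left := vs.take mid
    let right := vs.drop mid
    let lp := diffsGo left
    let rp := diffsGo right
    match left.getLast?, right.head? with
    | some a, some b =>
        (lp.1 + rp.1 + (if b - a = 1 then 1 else 0),
         lp.2 + rp.2 + (if b - a = 3 then 1 else 0))
    | _, _ => (0, 0)
termination_by vs.length
decreasing_by
  · simp only [List.length_take]; omega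
  · simp only [List.length_drop]; omega

def diffs_alt (values : List Int) : Int :=
  let ot := diffsGo values
  ot.1 * (ot.2 + 1)

-- ===== PRECONDITION & SPEC =====
def Spec_diffs (values : List Int) (out : Int) : Prop := out = diffs_alt values
instance (values : List Int) (out : Int) : Decidable (Spec_diffs values out) := by unfold Spec_diffs; infer_instance

-- ===== CLAIM (what is proved, stated in full; the proofs are below) =====
def Claim_equal_diffs : Prop := ∀ (values : List Int), Dom_diffs values → Spec_diffs values (diffs values)

-- ===== LEMMAS AND PROOFS =====

-- the list of adjacent differences, as a structural recursion
def adj : List Int → List Int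
  | a :: b :: t => (b - a) :: adj (b :: t)
  | _ => []

theorem adj_eq_zip (l : List Int) :
    (l.zip l.tail).map (fun p : Int × Int => p.2 - p.1) = adj l := by
  induction l with
  | nil => rfl
  | cons a t ih =>
    cases t with
    | nil => rfl
    | cons b t' =>
      simp only [List.tail_cons, List.zip_cons_cons, List.map_cons, adj]
      simpa using ih

-- zipping values[:-1] with values[1:] is the same as zipping values with its tail (zip truncates)
theorem zip_dropLast_tail (l : List Int) : l.dropLast.zip l.tail = l.zip l.tail := by
  induction l with
  | nil => rfl
  | cons a t ih =>
    cases t with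
    | nil => rfl
    | cons b t' =>
      simp only [List.dropLast_cons₂, List.zip_cons_cons, List.tail_cons]
      have h := ih
      simp only [List.tail_cons] at h
      rw [h]

theorem adj_append (xs ys : List Int) (a b : Int)
    (hx : xs.getLast? = some a) (hy : ys.head? = some b) :
    adj (xs ++ ys) = adj xs ++ (b - a) :: adj ys := by
  induction xs with
  | nil => simp at hx
  | cons x xt ih =>
    cases xt with
    | nil =>
      cases ys with
      | nil => simp at hy
      | cons y yt =>
        simp only [List.getLast?_singleton, Option.some.injEq] at hx
        simp only [List.head?_cons, Option.some.injEq] at hy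
        subst hx; subst hy
        simp [adj]
    | cons x' xt' =>
      have hx' : (x' :: xt').getLast? = some a := by
        rwa [List.getLast?_cons_cons] at hx
      have := ih hx'
      simp only [List.cons_append] at *
      simp [adj, this]

theorem diffsGo_eq (vs : List Int) :
    diffsGo vs = ((((adj vs).count 1 : Nat) : Int), (((adj vs).count 3 : Nat) : Int)) := by
  induction vs using diffsGo.induct with
  | case1 vs h =>
    rw [diffsGo, dif_pos h]
    match vs, h with
    | [], _ => simp [adj]
    | [_], _ => simp [adj]
  | case2 vs h mid left right a b hy hx ih1 ih2 =>
    have hx' : (vs.take (vs.length / 2)).getLast? = some a := hx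
    have hy' : (vs.drop (vs.length / 2)).head? = some b := hy
    have ih1' : diffsGo (vs.take (vs.length / 2)) =
        ((((adj (vs.take (vs.length / 2))).count 1 : Nat) : Int),
         (((adj (vs.take (vs.length / 2))).count 3 : Nat) : Int)) := ih1
    have ih2' : diffsGo (vs.drop (vs.length / 2)) =
        ((((adj (vs.drop (vs.length / 2))).count 1 : Nat) : Int),
         (((adj (vs.drop (vs.length / 2))).count 3 : Nat) : Int)) := ih2
    have hsplit : adj vs =
        adj (vs.take (vs.length / 2)) ++ (b - a) :: adj (vs.drop (vs.length / 2)) := by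
      conv_lhs => rw [← List.take_append_drop (vs.length / 2) vs]
      exact adj_append _ _ a b hx' hy'
    rw [diffsGo]
    simp only [dif_neg h, hx', hy', ih1', ih2', hsplit, List.count_append, List.count_cons]
    refine Prod.ext ?_ ?_ <;> (simp only []; push_cast; split_ifs with h1 <;> simp_all <;> omega)
  | case3 vs h mid left right hm ih1 ih2 =>
    exfalso
    have hx : (vs.take (vs.length / 2)).getLast? ≠ none := by
      intro hn
      rcases List.take_eq_nil_iff.mp (List.getLast?_eq_none_iff.mp hn) with h0 | h0
      · omega
      · rw [h0] at h; simp at h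
    have hy : (vs.drop (vs.length / 2)).head? ≠ none := by
      intro hn
      have h0 := List.drop_eq_nil_iff.mp (List.head?_eq_none_iff.mp hn)
      omega
    cases hl : (vs.take (vs.length / 2)).getLast? with
    | none => exact hx hl
    | some a =>
      cases hr : (vs.drop (vs.length / 2)).head? with
      | none => exact hy hr
      | some b => exact hm a b hl hr

theorem diffs_eq (values : List Int) : diffs values = diffs_alt values := by
  unfold diffs diffs_alt
  simp only [PySem.List.slice_to_neg_one, PySem.List.slice_from_one,
    zip_dropLast_tail, PySem.List.foldl_append_singleton_eq_map, List.nil_append,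
    PySem.List.count_eq, adj_eq_zip]
  rw [List.count_append, List.count_append, diffsGo_eq values]
  have h1 : List.count (1:Int) [3] = 0 := by decide
  have h3 : List.count (3:Int) [3] = 1 := by decide
  rw [h1, h3]
  push_cast
  ring

-- ===== VERDICT (by name: the statement is the Claim_ definition above) =====
theorem diffs_spec : Claim_equal_diffs := by
  intro values _
  unfold Spec_diffs
  exact diffs_eq values
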